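-- pv_equiv track=rewrite | github.com/LorenaDerezanin/coli_phage_interactions_2023 | lyzortx/pipeline/track_i/steps/build_tier_a_additional_source_ingests.py | _apply_pair_disagreement_flags
-- ===== SOURCE A (Python) =====
-- from collections import Counter, defaultdict
-- from typing import Any, Dict, Iterable, List, Mapping, Optional, Sequence
--
-- def _apply_pair_disagreement_flags(rows: Sequence[Dict[str, str]]) -> List[Dict[str, str]]:
--     responses_by_pair: Dict[tuple[str, str], set[str]] = defaultdict(set)
--     for row in rows:
--         key = (row["bacteria"], row["phage"])
--         response_name = row.get("global_response", "").strip()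
--         if response_name:
--             responses_by_pair[key].add(response_name)
--
--     flagged_rows: List[Dict[str, str]] = []
--     for row in rows:
--         updated_row = dict(row)
--         updated_row["source_disagreement_flag"] = (
--             "1" if len(responses_by_pair[(row["bacteria"], row["phage"])]) > 1 else "0"
--         )
--         flagged_rows.append(updated_row)
--     return flagged_rows
-- ===== SOURCE B (Python) =====
-- from typing import Dict, List, Sequence
--
--
-- def _apply_pair_disagreement_flags(rows: Sequence[Dict[str, str]]) -> List[Dict[str, str]]:
--     # Brute-force per-row scan: a row is flagged iff some other row with the
--     # same (bacteria, phage) pair carries a different non-empty response.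
--     # No index is built; each row's flag is computed directly from the data.
--     rows = list(rows)
--     out: List[Dict[str, str]] = []
--     for row in rows:
--         key = (row["bacteria"], row["phage"])
--         resps = [r.get("global_response", "").strip()
--                  for r in rows if (r["bacteria"], r["phage"]) == key]
--         resps = [x for x in resps if x]
--         flag = "1" if any(x != resps[0] for x in resps) else "0"
--         new_row = dict(row)
--         new_row["source_disagreement_flag"] = flag
--         out.append(new_row)
--     return out
-- ===== Notes on version B (the rewrite author's own statement) =====
-- stated objective: alternative
-- what changed: B drops A's precomputed per-pair response-set index entirely: for each row it rescans the whole input for rows with the same pair and flags iff some non-empty stripped response differs from the first one, trading A's aggregate-then-lookup for a direct quadratic scan.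
import Mathlib
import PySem

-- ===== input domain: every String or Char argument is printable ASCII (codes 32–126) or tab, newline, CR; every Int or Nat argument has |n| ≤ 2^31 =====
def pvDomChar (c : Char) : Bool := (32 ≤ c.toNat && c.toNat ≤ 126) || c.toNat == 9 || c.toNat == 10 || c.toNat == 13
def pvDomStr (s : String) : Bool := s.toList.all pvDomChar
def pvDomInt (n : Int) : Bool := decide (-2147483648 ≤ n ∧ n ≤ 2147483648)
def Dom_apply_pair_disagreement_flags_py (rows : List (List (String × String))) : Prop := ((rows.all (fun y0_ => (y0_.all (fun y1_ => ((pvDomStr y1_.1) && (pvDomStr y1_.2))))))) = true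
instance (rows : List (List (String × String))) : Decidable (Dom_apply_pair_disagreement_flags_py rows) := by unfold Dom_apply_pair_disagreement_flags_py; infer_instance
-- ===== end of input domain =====

-- B drops A's precomputed per-pair response-set index: for each row it rescans the whole
-- input for rows with the same pair and flags iff some non-empty stripped response differs
-- from the first one (objective: alternative; B is O(n^2) where A is O(n)).

-- Each row is a Python dict, received as an association list; dict semantics
-- (duplicate keys collapse, last value wins, first position kept) are PySem.Dict.ofList.
def pvRowKey (row : List (String × String)) : String × String :=
  let rd := PySem.Dict.ofList row
  (rd.getD "bacteria" "", rd.getD "phage" "")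

def pvRowResp (row : List (String × String)) : String :=
  PySem.Str.strip ((PySem.Dict.ofList row).getD "global_response" "")

-- ===== PORT A =====
-- first loop of A: responses_by_pair (defaultdict(set); [key].add(resp))
def pvStepA (d : PySem.Dict (String × String) (PySem.Set String))
    (row : List (String × String)) : PySem.Dict (String × String) (PySem.Set String) :=
  let resp := pvRowResp row
  if resp ≠ "" then
    d.modify (pvRowKey row) PySem.Set.empty (fun s => PySem.Set.add s resp)
  else d

def apply_pair_disagreement_flags_py (rows : List (List (String × String))) : List (List (String × String)) :=
  let responses := rows.foldl pvStepA PySem.Dict.empty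
  rows.foldl
    (fun acc row =>
      acc ++ [((PySem.Dict.ofList row).insert "source_disagreement_flag"
        (if 1 < (responses.getD (pvRowKey row) PySem.Set.empty).length then "1" else "0")).items])
    []

-- ===== PORT B =====
-- B's inner comprehensions: the non-empty stripped responses of all rows sharing `key`
def pvRespsFor (rows : List (List (String × String))) (key : String × String) : List String :=
  ((rows.filter (fun r => pvRowKey r == key)).map pvRowResp).filter (fun x => x != "")

def apply_pair_disagreement_flags_py_alt (rows : List (List (String × String))) : List (List (String × String)) :=
  rows.foldl
    (fun acc row =>
      let resps := pvRespsFor rows (pvRowKey row)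
      -- "1" if any(x != resps[0] for x in resps) else "0"  (resps[0] is only read when resps ≠ [])
      let flag := match resps with
        | [] => "0"
        | h :: _ => if resps.any (fun x => x != h) then "1" else "0"
      acc ++ [((PySem.Dict.ofList row).insert "source_disagreement_flag" flag).items])
    []

-- ===== PRECONDITION & SPEC =====
-- Pre_ excludes exactly the inputs where A raises KeyError: some row lacking key "bacteria" or "phage".
def Pre_apply_pair_disagreement_flags_py (rows : List (List (String × String))) : Prop :=
  (rows.all (fun row => row.any (fun p => p.1 == "bacteria") && row.any (fun p => p.1 == "phage"))) = true
instance (rows : List (List (String × String))) : Decidable (Pre_apply_pair_disagreement_flags_py rows) := by unfold Pre_apply_pair_disagreement_flags_py; infer_instance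

def pvWitness_apply_pair_disagreement_flags_py : (List (List (String × String))) :=
  [[("bacteria", "e.coli"), ("phage", "T4"), ("global_response", " lysis ")],
   [("bacteria", "e.coli"), ("phage", "T4"), ("global_response", "resistant")],
   [("bacteria", "e.coli"), ("phage", "T7")]]

def Spec_apply_pair_disagreement_flags_py (rows : List (List (String × String))) (out : List (List (String × String))) : Prop := out = apply_pair_disagreement_flags_py_alt rows
instance (rows : List (List (String × String))) (out : List (List (String × String))) : Decidable (Spec_apply_pair_disagreement_flags_py rows out) := by unfold Spec_apply_pair_disagreement_flags_py; infer_instance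

-- ===== CLAIM (what is proved, stated in full; the proofs are below) =====
def Claim_equal_apply_pair_disagreement_flags_py : Prop := ∀ (rows : List (List (String × String))), Dom_apply_pair_disagreement_flags_py rows → Pre_apply_pair_disagreement_flags_py rows → Spec_apply_pair_disagreement_flags_py rows (apply_pair_disagreement_flags_py rows)

-- ===== LEMMAS AND PROOFS =====

-- A's aggregated set for key k is exactly set(pvRespsFor rows k)
theorem pvRespsFor_cons (row : List (String × String)) (rest : List (List (String × String))) (k : String × String) :
    pvRespsFor (row :: rest) k
      = if pvRowKey row = k ∧ pvRowResp row ≠ "" then pvRowResp row :: pvRespsFor rest k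
        else pvRespsFor rest k := by
  by_cases hk : pvRowKey row = k <;> by_cases hr : pvRowResp row = "" <;>
    simp [pvRespsFor, hk, hr]

-- A's aggregated set for key k is exactly set(pvRespsFor rows k)
theorem pvFoldA_getD (rows : List (List (String × String)))
    (d : PySem.Dict (String × String) (PySem.Set String)) (k : String × String) :
    (rows.foldl pvStepA d).getD k PySem.Set.empty
      = (pvRespsFor rows k).foldl PySem.Set.add (d.getD k PySem.Set.empty) := by
  induction rows generalizing d with
  | nil => rfl
  | cons row rest ih =>
    rw [List.foldl_cons, ih, pvRespsFor_cons]
    by_cases hr : pvRowResp row = ""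
    · rw [if_neg (by tauto)]
      simp [pvStepA, hr]
    · by_cases hk : pvRowKey row = k
      · rw [if_pos ⟨hk, hr⟩, List.foldl_cons]
        congr 1
        simp only [pvStepA, if_pos (show pvRowResp row ≠ "" from hr)]
        rw [PySem.Dict.getD_modify, if_pos hk.symm, hk]
      · rw [if_neg (fun h => hk h.1)]
        have hinit : (pvStepA d row).getD k PySem.Set.empty = d.getD k PySem.Set.empty := by
          simp only [pvStepA, if_pos (show pvRowResp row ≠ "" from hr)]
          rw [PySem.Dict.getD_modify, if_neg (fun h => hk h.symm)]
        rw [hinit]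

theorem pvTwoMem {α : Type} (s : List α) (a b : α) (ha : a ∈ s) (hb : b ∈ s) (hne : a ≠ b) :
    1 < s.length := by
  match s with
  | [] => cases ha
  | [x] =>
    simp only [List.mem_singleton] at ha hb
    exact absurd (ha.trans hb.symm) hne
  | x :: y :: t => simp

-- the flag condition: |set(l)| > 1 iff some element of l differs from its first
theorem pvFlagIff (h : String) (t : List String) :
    1 < (PySem.Set.ofList (h :: t)).length ↔ ((h :: t).any (fun x => x != h)) = true := by
  constructor
  · intro hlen
    rw [PySem.Set.ofList_cons] at hlen
    have hnd : (PySem.Set.ofList (h :: t)).Nodup := PySem.Set.nodup_ofList _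
    rw [PySem.Set.ofList_cons] at hnd
    cases hdt : PySem.Set.discard (PySem.Set.ofList t) h with
    | nil => rw [hdt] at hlen; simp at hlen
    | cons b u =>
      have hb : b ∈ PySem.Set.ofList (h :: t) := by
        rw [PySem.Set.ofList_cons, hdt]; simp
      have hbh : b ≠ h := by
        rw [hdt] at hnd
        intro he; subst he
        exact (List.nodup_cons.mp hnd).1 (by simp)
      rw [PySem.Set.mem_ofList] at hb
      simp only [List.any_eq_true]
      exact ⟨b, hb, by simp [hbh]⟩
  · intro hany
    simp only [List.any_eq_true] at hany
    obtain ⟨x, hx, hxh⟩ := hany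
    have hxh' : x ≠ h := by simpa using hxh
    exact pvTwoMem _ x h ((PySem.Set.mem_ofList _ _).mpr hx)
      ((PySem.Set.mem_ofList _ _).mpr (by simp)) hxh'

-- ===== VERDICT (by name: the statement is the Claim_ definition above) =====
theorem apply_pair_disagreement_flags_py_spec : Claim_equal_apply_pair_disagreement_flags_py := by
  intro rows _ _
  unfold Spec_apply_pair_disagreement_flags_py
  unfold apply_pair_disagreement_flags_py apply_pair_disagreement_flags_py_alt
  rw [PySem.List.foldl_append_singleton_eq_map, PySem.List.foldl_append_singleton_eq_map]
  simp only [List.nil_append]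
  apply List.map_congr_left
  intro row _
  congr 1
  have hset := pvFoldA_getD rows PySem.Dict.empty (pvRowKey row)
  rw [PySem.Dict.getD_empty] at hset
  rw [hset]
  cases hl : pvRespsFor rows (pvRowKey row) with
  | nil => simp
  | cons h t =>
    have hofl : List.foldl PySem.Set.add (PySem.Set.empty : PySem.Set String) (h :: t)
        = PySem.Set.ofList (h :: t) := rfl
    rw [hofl]
    by_cases hc : ((h :: t).any (fun x => x != h)) = true
    · rw [if_pos ((pvFlagIff h t).mpr hc)]
      simp [hc]
    · rw [if_neg (fun hx => hc ((pvFlagIff h t).mp hx))]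
      simp [hc]
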